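-- pv_equiv track=rewrite | github.com/microsoft/HAMS | mapping_cli/maneuvers/rpp.py | aggregate_direction
-- ===== SOURCE A (Python) =====
-- import itertools
--
-- def aggregate_direction(direction_vector, halt_len):
--     """
--     Input: vector containing 'forward', 'reverse'
--     Output: # of forwards, # of reverse
--     """
--     direction_count = {"F": 0, "R": 0, "H": 0}
--     # Group consecutive directions
--     grouped_class = [
--         list(l)
--         for _, l in itertools.groupby(enumerate(direction_vector), key=lambda x: x[1])
--     ]
--     new_direction_vector = []
--     for c_idx, c in enumerate(grouped_class):
--         if c[0][1] == 0:
--             direction_count["R"] += 1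
--             new_direction_vector += [0 for i in range(len(c))]
--         elif c[0][1] == 1:
--             direction_count["F"] += 1
--             new_direction_vector += [1 for i in range(len(c))]
--         elif c[0][1] == -1:
--             if len(c) > halt_len:
--                 direction_count["H"] += 1
--                 new_direction_vector += [-1 for i in range(len(c))]
--             else:
--                 # Start segment
--                 if c_idx > 0:
--                     prev_direction = grouped_class[c_idx - 1][0][1]
--                 else:
--                     next_direction = grouped_class[c_idx + 1][0][1]
--                     prev_direction = next_direction
--
--                 # End segment
--                 if c_idx < len(grouped_class) - 1:
--                     next_direction = grouped_class[c_idx + 1][0][1]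
--                 else:
--                     next_direction = prev_direction
--
--                 new_direction_vector += [prev_direction for i in range(len(c) // 2)]
--                 new_direction_vector += [next_direction for i in range(len(c) // 2)]
--
--     return direction_count, new_direction_vector
-- ===== SOURCE B (Python) =====
-- def aggregate_direction(direction_vector, halt_len):
--     """Online one-element-at-a-time state machine: emit 0/1 elements eagerly as they
--     arrive, buffer only the length of a pending halt (-1) run and flush it when the
--     next run's first element (or end of input) reveals the neighbouring direction.
--     No grouping pass and no materialised run structure."""
--     counts = {"F": 0, "R": 0, "H": 0}
--     out = []
--     prev_run = None   # value of the run before the current one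
--     cur = None        # value of the current run
--     hlen = 0          # length of the pending halt run (only meaningful when cur == -1)
--
--     def flush_halt(nxt):
--         nonlocal hlen
--         if hlen > halt_len:
--             counts["H"] += 1
--             out.extend([-1] * hlen)
--         else:
--             p = prev_run if prev_run is not None else nxt
--             n = nxt if nxt is not None else p
--             out.extend([p] * (hlen // 2))
--             out.extend([n] * (hlen // 2))
--         hlen = 0
--
--     for x in direction_vector:
--         if cur is None or x != cur:
--             if cur == -1:
--                 flush_halt(x)
--             prev_run, cur = cur, x
--             if x == 0:
--                 counts["R"] += 1
--                 out.append(0)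
--             elif x == 1:
--                 counts["F"] += 1
--                 out.append(1)
--             elif x == -1:
--                 hlen = 1
--         else:
--             if x == 0 or x == 1:
--                 out.append(x)
--             elif x == -1:
--                 hlen += 1
--     if cur == -1:
--         flush_halt(None)
--     return counts, out
-- ===== Notes on version B (the rewrite author's own statement) =====
-- stated objective: faster
-- what changed: Replaced A's two-stage groupby-then-indexed-loop (materialise all consecutive groups as lists of (index,value) pairs, then look neighbours up by index in the group list) with an online per-element state machine: 0/1 elements are emitted the moment they arrive, only the length of a pending halt run is buffered, and it is flushed when the next run's first element (or end of input) reveals the neighbouring direction; no grouping pass and no run structure exist.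
import Mathlib
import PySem

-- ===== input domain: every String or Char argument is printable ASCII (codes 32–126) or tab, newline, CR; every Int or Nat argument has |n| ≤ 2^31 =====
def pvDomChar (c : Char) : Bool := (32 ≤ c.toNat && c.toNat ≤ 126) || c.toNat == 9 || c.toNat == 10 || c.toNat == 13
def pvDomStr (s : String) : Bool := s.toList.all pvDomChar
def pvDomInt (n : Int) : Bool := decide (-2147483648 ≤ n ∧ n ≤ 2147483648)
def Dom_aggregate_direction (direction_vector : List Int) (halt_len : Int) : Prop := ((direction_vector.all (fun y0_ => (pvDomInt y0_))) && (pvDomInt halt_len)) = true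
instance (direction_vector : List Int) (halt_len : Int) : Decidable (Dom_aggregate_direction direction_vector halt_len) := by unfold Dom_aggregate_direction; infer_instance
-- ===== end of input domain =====

-- B replaces A's groupby-then-indexed-group-list pass by an online per-element state
-- machine (eager emission for 0/1, a buffered pending halt run flushed at the next run
-- boundary); measured faster by a constant factor, return values proved equal on Pre_.

-- `d[k] += 1` on a dict whose key is always present
def pvBump (d : PySem.Dict String Int) (k : String) : PySem.Dict String Int :=
  d.insert k (d.getD k 0 + 1)

-- ===== PORT A =====
-- c[0][1] — the value component of the first (index, value) pair of a group
def pvFirstVal (c : List (Int × Int)) : Int := (c.headD (0, 0)).2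

-- itertools.groupby(·, key=lambda x: x[1]) : consecutive pairs with equal value component
def pvGroupBy : List (Int × Int) → List (List (Int × Int))
  | [] => []
  | x :: xs =>
    match pvGroupBy xs with
    | [] => [[x]]
    | [] :: gs => [x] :: gs   -- unreachable: groups are never empty
    | (y :: g) :: gs =>
      if x.2 = y.2 then (x :: y :: g) :: gs else [x] :: (y :: g) :: gs

-- the body of A's `for c_idx, c in enumerate(grouped_class)` loop
def pvALoop (gc : List (List (Int × Int))) (halt_len : Int)
    (st : PySem.Dict String Int × List Int) (p : Int × List (Int × Int)) :
    PySem.Dict String Int × List Int :=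
  let c_idx := p.1
  let c := p.2
  if pvFirstVal c = 0 then
    (pvBump st.1 "R", st.2 ++ List.replicate c.length 0)
  else if pvFirstVal c = 1 then
    (pvBump st.1 "F", st.2 ++ List.replicate c.length 1)
  else if pvFirstVal c = -1 then
    if (c.length : Int) > halt_len then
      (pvBump st.1 "H", st.2 ++ List.replicate c.length (-1))
    else
      let prev := if c_idx > 0 then pvFirstVal ((PySem.List.pyGet? gc (c_idx - 1)).getD [])
                  else pvFirstVal ((PySem.List.pyGet? gc (c_idx + 1)).getD [])
      let nxt := if c_idx < (gc.length : Int) - 1 then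
                   pvFirstVal ((PySem.List.pyGet? gc (c_idx + 1)).getD [])
                 else prev
      (st.1, st.2 ++ List.replicate (c.length / 2) prev ++ List.replicate (c.length / 2) nxt)
  else st

def aggregate_direction (direction_vector : List Int) (halt_len : Int) :
    (List (String × Int)) × List Int :=
  let direction_count : PySem.Dict String Int := PySem.Dict.ofList [("F", 0), ("R", 0), ("H", 0)]
  let grouped_class := pvGroupBy (PySem.List.enumerate direction_vector)
  let r := (PySem.List.enumerate grouped_class).foldl (pvALoop grouped_class halt_len)
             (direction_count, [])
  (r.1.items, r.2)

-- ===== PORT B =====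
-- B's streaming state: ((counts, out), prev_run, cur, hlen)
-- `flush_halt(nxt)` of Source B (prev_run is `pr`, hlen is `h`; None → Option.none)
def pvFlushHalt (halt_len : Int) (st : PySem.Dict String Int × List Int)
    (pr : Option Int) (h : Nat) (nxt : Option Int) : PySem.Dict String Int × List Int :=
  if (h : Int) > halt_len then
    (pvBump st.1 "H", st.2 ++ List.replicate h (-1))
  else
    let p := pr.getD (nxt.getD 0)   -- Python's None default never reached inside Pre_
    let n := nxt.getD p
    (st.1, st.2 ++ List.replicate (h / 2) p ++ List.replicate (h / 2) n)

-- run-boundary part of the loop body: prev_run, cur := cur, x; start-of-run effects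
def pvStartRun (st : PySem.Dict String Int × List Int) (cur : Option Int) (x : Int) (h : Nat) :
    (PySem.Dict String Int × List Int) × Option Int × Option Int × Nat :=
  if x = 0 then ((pvBump st.1 "R", st.2 ++ [0]), cur, some x, h)
  else if x = 1 then ((pvBump st.1 "F", st.2 ++ [1]), cur, some x, h)
  else if x = -1 then (st, cur, some x, 1)
  else (st, cur, some x, h)

-- body of `for x in direction_vector`
def pvBStep (halt_len : Int)
    (s : (PySem.Dict String Int × List Int) × Option Int × Option Int × Nat) (x : Int) :
    (PySem.Dict String Int × List Int) × Option Int × Option Int × Nat :=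
  let (st, pr, cur, h) := s
  match cur with
  | none => pvStartRun st none x h
  | some c =>
    if x = c then
      if x = 0 ∨ x = 1 then ((st.1, st.2 ++ [x]), pr, cur, h)
      else if x = -1 then (st, pr, cur, h + 1)
      else s
    else
      let st1 := if c = -1 then pvFlushHalt halt_len st pr h (some x) else st
      let h1 := if c = -1 then 0 else h
      pvStartRun st1 (some c) x h1

-- the trailing `if cur == -1: flush_halt(None)`
def pvBFinish (halt_len : Int)
    (s : (PySem.Dict String Int × List Int) × Option Int × Option Int × Nat) :
    PySem.Dict String Int × List Int :=
  let (st, pr, cur, h) := s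
  if cur = some (-1) then pvFlushHalt halt_len st pr h none else st

def aggregate_direction_alt (direction_vector : List Int) (halt_len : Int) :
    (List (String × Int)) × List Int :=
  let counts : PySem.Dict String Int := PySem.Dict.ofList [("F", 0), ("R", 0), ("H", 0)]
  let r := pvBFinish halt_len
             (direction_vector.foldl (pvBStep halt_len) ((counts, []), none, none, 0))
  (r.1.items, r.2)

-- ===== PRECONDITION & SPEC =====
-- Pre_ excludes exactly the inputs where Python A raises IndexError (a non-empty vector that is
-- one single halt run of length ≤ halt_len: A reads grouped_class[1] which does not exist).
def Pre_aggregate_direction (direction_vector : List Int) (halt_len : Int) : Prop :=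
  ¬ (direction_vector ≠ [] ∧ (∀ x ∈ direction_vector, x = -1) ∧
     (direction_vector.length : Int) ≤ halt_len)
instance (direction_vector : List Int) (halt_len : Int) :
    Decidable (Pre_aggregate_direction direction_vector halt_len) := by
  unfold Pre_aggregate_direction; infer_instance

def pvWitness_aggregate_direction : List Int × Int := ([1, -1, -1, 0, 0], 3)

def Spec_aggregate_direction (direction_vector : List Int) (halt_len : Int) (out : (List (String × Int)) × List Int) : Prop := out = aggregate_direction_alt direction_vector halt_len
instance (direction_vector : List Int) (halt_len : Int) (out : (List (String × Int)) × List Int) : Decidable (Spec_aggregate_direction direction_vector halt_len out) := by unfold Spec_aggregate_direction; infer_instance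

-- ===== CLAIM (what is proved, stated in full; the proofs are below) =====
def Claim_equal_aggregate_direction : Prop := ∀ (direction_vector : List Int) (halt_len : Int), Dom_aggregate_direction direction_vector halt_len → Pre_aggregate_direction direction_vector halt_len → Spec_aggregate_direction direction_vector halt_len (aggregate_direction direction_vector halt_len)

-- ===== LEMMAS AND PROOFS =====

-- run-length decomposition of the direction vector: list of (value, length)
def pvRuns : List Int → List (Int × Nat)
  | [] => []
  | v :: vs =>
    match pvRuns vs with
    | [] => [(v, 1)]
    | (w, L) :: rs => if v = w then (v, L + 1) :: rs else (v, 1) :: (w, L) :: rs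

def pvFlat (rs : List (Int × Nat)) : List Int := rs.flatMap (fun p => List.replicate p.2 p.1)

def pvGMap (gs : List (List (Int × Int))) : List (Int × Nat) :=
  gs.map (fun g => (pvFirstVal g, g.length))

-- common run-level processor both loops compute
def pvGo (halt_len : Int) : List (Int × Nat) → Option Int →
    (PySem.Dict String Int × List Int) → (PySem.Dict String Int × List Int)
  | [], _, st => st
  | (v, L) :: rs, prev, st =>
    if v = 0 then pvGo halt_len rs (some v) (pvBump st.1 "R", st.2 ++ List.replicate L 0)
    else if v = 1 then pvGo halt_len rs (some v) (pvBump st.1 "F", st.2 ++ List.replicate L 1)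
    else if v = -1 then
      if (L : Int) > halt_len then
        pvGo halt_len rs (some v) (pvBump st.1 "H", st.2 ++ List.replicate L (-1))
      else
        let nh : Int := match rs with | [] => 0 | (w, _) :: _ => w
        let prevv : Int := match prev with | some p => p | none => nh
        let nxtv : Int := match rs with | (w, _) :: _ => w | [] => prevv
        pvGo halt_len rs (some v)
          (st.1, st.2 ++ List.replicate (L / 2) prevv ++ List.replicate (L / 2) nxtv)
    else pvGo halt_len rs (some v) st

theorem pvRuns_spec (vs : List Int) :
    pvFlat (pvRuns vs) = vs ∧ (∀ p ∈ pvRuns vs, 0 < p.2) ∧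
    (pvRuns vs).IsChain (fun a b => a.1 ≠ b.1) := by
  induction vs with
  | nil => simp [pvRuns, pvFlat]
  | cons v vs ih =>
    obtain ⟨h1, h2, h3⟩ := ih
    cases h : pvRuns vs with
    | nil =>
      rw [h] at h1
      simp [pvFlat] at h1
      simp [pvRuns, h, pvFlat, ← h1]
    | cons p rs =>
      obtain ⟨w, L⟩ := p
      rw [h] at h1 h2 h3
      by_cases hvw : v = w
      · subst hvw
        refine ⟨?_, ?_, ?_⟩
        · simp only [pvRuns, h, if_pos rfl]
          simp only [pvFlat, List.flatMap_cons] at h1 ⊢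
          rw [← h1]
          simp [List.replicate_succ]
        · simp only [pvRuns, h, if_pos rfl]
          intro p hp
          rcases List.mem_cons.mp hp with hp | hp
          · subst hp; omega
          · exact h2 p (List.mem_cons_of_mem _ hp)
        · simp only [pvRuns, h, if_true, if_pos rfl]
          cases rs with
          | nil => simp
          | cons q rs' =>
            obtain ⟨hne, hch⟩ := List.isChain_cons_cons.mp h3
            exact List.isChain_cons_cons.mpr ⟨hne, hch⟩
      · refine ⟨?_, ?_, ?_⟩
        · simp only [pvRuns, h, if_neg hvw]
          simp only [pvFlat, List.flatMap_cons] at h1 ⊢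
          rw [← h1]
          simp
        · simp only [pvRuns, h, if_neg hvw]
          intro p hp
          rcases List.mem_cons.mp hp with hp | hp
          · subst hp; omega
          · exact h2 p hp
        · simp only [pvRuns, h, if_neg hvw]
          exact List.isChain_cons_cons.mpr ⟨hvw, h3⟩

theorem pvGroupBy_spec (l : List (Int × Int)) :
    pvGMap (pvGroupBy l) = pvRuns (l.map (·.2)) ∧ [] ∉ pvGroupBy l := by
  induction l with
  | nil => simp [pvGroupBy, pvGMap, pvRuns]
  | cons x l ih =>
    obtain ⟨h1, h2⟩ := ih
    cases h : pvGroupBy l with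
    | nil =>
      rw [h] at h1
      simp only [pvGMap, List.map_nil] at h1
      refine ⟨?_, ?_⟩
      · simp only [pvGroupBy, h, List.map_cons, pvRuns]
        rw [← h1]
        simp [pvGMap, pvFirstVal]
      · simp [pvGroupBy, h]
    | cons g gs =>
      cases g with
      | nil =>
        rw [h] at h2
        exact absurd (List.mem_cons_self) h2
      | cons y g' =>
        rw [h] at h1 h2
        simp only [pvGMap, List.map_cons] at h1
        by_cases hxy : x.2 = y.2
        · constructor
          · simp only [pvGroupBy, h, if_pos hxy, pvGMap, List.map_cons, List.map_cons, pvRuns]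
            rw [← h1]
            simp [pvGMap, pvFirstVal, hxy, List.length_cons]
          · simp only [pvGroupBy, h, if_pos hxy]
            intro hc
            rcases List.mem_cons.mp hc with hc | hc
            · simp at hc
            · exact h2 (List.mem_cons_of_mem _ hc)
        · constructor
          · simp only [pvGroupBy, h, if_neg hxy, pvGMap, List.map_cons, pvRuns]
            rw [← h1]
            simp [pvGMap, pvFirstVal, hxy]
          · simp only [pvGroupBy, h, if_neg hxy]
            intro hc
            rcases List.mem_cons.mp hc with hc | hc
            · simp at hc
            · exact h2 hc

theorem amain (hl : Int) (gc : List (List (Int × Int))) :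
    ∀ (gs pre : List (List (Int × Int))) st, gc = pre ++ gs →
    (PySem.List.enumerate gs (pre.length : Int)).foldl (pvALoop gc hl) st
      = pvGo hl (pvGMap gs) (pre.getLast?.map pvFirstVal) st := by
  intro gs
  induction gs with
  | nil =>
    intro pre st hgc
    simp [pvGMap, pvGo]
  | cons g gs' ih =>
    intro pre st hgc
    rw [PySem.List.enumerate_cons, List.foldl_cons]
    have hcast : (pre.length : Int) + 1 = (((pre ++ [g]).length : Nat) : Int) := by simp
    rw [hcast, ih (pre ++ [g]) _ (by rw [hgc]; simp)]
    have hlast : (pre ++ [g]).getLast?.map pvFirstVal = some (pvFirstVal g) := by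
      rw [List.getLast?_concat]; rfl
    rw [hlast]
    simp only [pvGMap, List.map_cons, pvGo, pvALoop]
    by_cases hv0 : pvFirstVal g = 0
    · rw [if_pos hv0, if_pos hv0]
    · rw [if_neg hv0, if_neg hv0]
      by_cases hv1 : pvFirstVal g = 1
      · rw [if_pos hv1, if_pos hv1]
      · rw [if_neg hv1, if_neg hv1]
        by_cases hvm : pvFirstVal g = -1
        · rw [if_pos hvm, if_pos hvm]
          by_cases hhl : (g.length : Int) > hl
          · rw [if_pos hhl, if_pos hhl]
          · rw [if_neg hhl, if_neg hhl]
            congr 2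
            rcases List.eq_nil_or_concat pre with hpre | ⟨q, a, hpre⟩
            · subst hpre
              rw [hgc]
              simp only [List.nil_append, List.length_nil, Int.natCast_zero]
              rw [if_neg (by omega : ¬ (0 : Int) > 0)]
              cases gs' with
              | nil =>
                have h1 : PySem.List.pyGet? [g] ((0:Int) + 1) = none := by
                  rw [PySem.List.pyGet?_eq_none_iff]
                  simp [PySem.Raise.InRange]
                rw [if_neg (by norm_num : ¬ ((0:Int) < ↑([g] : List (List (Int × Int))).length - 1)), h1]
                simp [pvFirstVal, pvGMap]
              | cons g' rest =>
                have h1 : PySem.List.pyGet? (g :: g' :: rest) ((0:Int) + 1) = some g' := by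
                  norm_num
                rw [if_pos (by push_cast [List.length_append, List.length_cons, List.length_nil]; omega : ((0:Int) < ↑((g :: g' :: rest) : List (List (Int × Int))).length - 1)), h1]
                simp [pvFirstVal, pvGMap]
            · rw [List.concat_eq_append] at hpre
              subst hpre
              have hpos : ((q ++ [a]).length : Int) > 0 := by push_cast [List.length_append, List.length_cons, List.length_nil]; omega
              rw [if_pos hpos, List.getLast?_concat]
              have hidx : ((q ++ [a]).length : Int) - 1 = (q.length : Int) := by push_cast [List.length_append, List.length_cons, List.length_nil]; omega
              have hgc2 : gc = q ++ a :: (g :: gs') := by rw [hgc]; simp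
              have hprevA : PySem.List.pyGet? gc (((q ++ [a]).length : Int) - 1) = some a := by
                rw [hidx, hgc2]
                simpa using PySem.List.pyGet?_append_length (pre := q) (y := a) (ys := g :: gs')
              rw [hprevA]
              cases gs' with
              | nil =>
                rw [if_neg (by rw [hgc]; push_cast [List.length_append, List.length_cons, List.length_nil]; omega)]
                simp [pvFirstVal, pvGMap]
              | cons g' rest =>
                rw [if_pos (by rw [hgc]; push_cast [List.length_append, List.length_cons, List.length_nil]; omega)]
                have hnxtA : PySem.List.pyGet? gc (((q ++ [a]).length : Int) + 1) = some g' := by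
                  rw [hgc]
                  have := PySem.List.pyGet?_append_right (q ++ [a]) (g :: g' :: rest) 1
                  simpa using this
                rw [hnxtA]
                simp [pvFirstVal, pvGMap]
        · rw [if_neg hvm, if_neg hvm]

-- ---- B side: the streaming fold computes pvGo ----

-- head value of a run list, as B's stream sees it at a boundary (`nxt`)
def pvHeadVal (rs : List (Int × Nat)) : Option Int := rs.head?.map (·.1)

-- pending halt flush: what B still owes for the just-finished run when cur = some (-1)
def pvPend (hl : Int) (st : PySem.Dict String Int × List Int)
    (pr : Option Int) (h : Nat) (nxt : Option Int) (cur : Option Int) :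
    PySem.Dict String Int × List Int :=
  if cur = some (-1) then pvFlushHalt hl st pr h nxt else st

-- inside a run: the remaining copies of v only emit eagerly / bump the halt buffer
theorem pvInRun (hl : Int) (v : Int) :
    ∀ (k : Nat) (rest : List Int) st pr h,
    List.foldl (pvBStep hl) (st, pr, some v, h) (List.replicate k v ++ rest) =
    List.foldl (pvBStep hl)
      ((st.1, st.2 ++ (if v = 0 ∨ v = 1 then List.replicate k v else [])), pr, some v,
        if v = -1 then h + k else h) rest := by
  intro k
  induction k with
  | zero =>
    intro rest st pr h
    simp
  | succ k ih =>
    intro rest st pr h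
    rw [List.replicate_succ, List.cons_append, List.foldl_cons]
    by_cases h01 : v = 0 ∨ v = 1
    · have hvm : v ≠ -1 := by rcases h01 with h | h <;> omega
      simp only [pvBStep, if_pos rfl, if_true, if_pos h01]
      rw [ih]
      simp [h01, hvm, List.replicate_succ, List.append_assoc]
    · by_cases hvm : v = -1
      · simp only [pvBStep, if_pos rfl, if_true, if_neg h01, if_pos hvm]
        rw [ih]
        have hk : h + 1 + k = h + (k + 1) := by omega
        simp [h01, hvm, hk]
      · simp only [pvBStep, if_pos rfl, if_true, if_neg h01, if_neg hvm]
        rw [ih]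
        simp [h01, hvm]

-- main streaming lemma: folding B over the flattened runs, then the final flush,
-- equals pvGo applied after discharging the pending flush of the current run
theorem bmain (hl : Int) :
    ∀ (rs : List (Int × Nat)), (∀ p ∈ rs, 0 < p.2) →
    rs.IsChain (fun a b => a.1 ≠ b.1) →
    ∀ (cur pr : Option Int) st h,
    (∀ v L rs', rs = (v, L) :: rs' → cur ≠ some v) →
    pvBFinish hl (List.foldl (pvBStep hl) (st, pr, cur, h) (pvFlat rs)) =
    pvGo hl rs cur (pvPend hl st pr h (pvHeadVal rs) cur) := by
  intro rs
  induction rs with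
  | nil =>
    intro _ _ cur pr st h _
    simp [pvFlat, pvBFinish, pvGo, pvPend, pvHeadVal]
  | cons p rs' ih =>
    obtain ⟨v, L⟩ := p
    intro hlen hch cur pr st h hne
    have hL : 0 < L := hlen (v, L) List.mem_cons_self
    have hcur : cur ≠ some v := hne v L rs' rfl
    have hflat : pvFlat ((v, L) :: rs') = v :: (List.replicate (L - 1) v ++ pvFlat rs') := by
      simp only [pvFlat, List.flatMap_cons]
      obtain ⟨m, rfl⟩ : ∃ m, L = m + 1 := ⟨L - 1, by omega⟩
      simp [List.replicate_succ]
    rw [hflat, List.foldl_cons]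
    -- the boundary step
    have hstep : pvBStep hl (st, pr, cur, h) v =
        pvStartRun (pvPend hl st pr h (pvHeadVal ((v, L) :: rs')) cur) cur v
          (if cur = some (-1) then 0 else h) := by
      cases cur with
      | none => simp [pvBStep, pvStartRun, pvPend]
      | some c =>
        have hvc : v ≠ c := fun hx => hcur (by rw [hx])
        simp only [pvBStep, if_neg hvc, pvPend, pvHeadVal, List.head?_cons, Option.map_some]
        by_cases hc : c = -1
        · simp [hc]
        · have : (some c : Option Int) ≠ some (-1) := by simp [hc]
          simp [hc, this]
    rw [hstep]
    set stA := pvPend hl st pr h (pvHeadVal ((v, L) :: rs')) cur with hstA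
    have hne' : ∀ w K rs'', rs' = (w, K) :: rs'' → (some v : Option Int) ≠ some w := by
      intro w K rs'' hrs hx
      have hch2 := hch
      rw [hrs] at hch2
      have := (List.isChain_cons_cons.mp hch2).1
      simp at hx
      exact this (by simp [hx])
    have hlen' : ∀ q ∈ rs', 0 < q.2 := fun q hq => hlen q (List.mem_cons_of_mem _ hq)
    have hch' : rs'.IsChain (fun a b => a.1 ≠ b.1) := hch.tail
    -- unfold pvStartRun by cases on v, then pvInRun, then ih
    by_cases hv0 : v = 0
    · subst hv0
      simp only [pvStartRun, if_pos rfl, if_true]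
      rw [pvInRun, ih hlen' hch' _ _ _ _ hne']
      have hrep : (0:Int) :: List.replicate (L - 1) (0:Int) = List.replicate L 0 := by
        obtain ⟨m, rfl⟩ : ∃ m, L = m + 1 := ⟨L - 1, by omega⟩
        simp [List.replicate_succ]
      norm_num [pvGo, pvPend, List.append_assoc, hrep]
    · by_cases hv1 : v = 1
      · subst hv1
        simp only [pvStartRun, if_neg (by norm_num : (1:Int) ≠ 0), if_pos rfl, if_true]
        rw [pvInRun, ih hlen' hch' _ _ _ _ hne']
        have hrep : (1:Int) :: List.replicate (L - 1) (1:Int) = List.replicate L 1 := by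
          obtain ⟨m, rfl⟩ : ∃ m, L = m + 1 := ⟨L - 1, by omega⟩
          simp [List.replicate_succ]
        norm_num [pvGo, pvPend, List.append_assoc, hrep]
      · by_cases hvm : v = -1
        · subst hvm
          simp only [pvStartRun, if_neg (by norm_num : (-1:Int) ≠ 0),
            if_neg (by norm_num : (-1:Int) ≠ 1), if_pos rfl, if_true]
          rw [pvInRun, ih hlen' hch' _ _ _ _ hne']
          have hLL : 1 + (L - 1) = L := by omega
          norm_num [pvGo, pvPend, pvFlushHalt, hLL]
          by_cases hhl : (L : Int) > hl
          · rw [if_pos hhl, if_pos hhl]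
          · rw [if_neg hhl, if_neg hhl]
            congr 2
            · cases rs' with
              | nil =>
                cases cur with
                | none => simp [pvHeadVal]
                | some c => simp [pvHeadVal]
              | cons q rs'' =>
                obtain ⟨w, K⟩ := q
                cases cur with
                | none => simp [pvHeadVal]
                | some c => simp [pvHeadVal]
        · simp only [pvStartRun, if_neg hv0, if_neg hv1, if_neg hvm]
          rw [pvInRun, ih hlen' hch' _ _ _ _ hne']
          have h01 : ¬ (v = 0 ∨ v = 1) := by tauto
          simp only [if_neg h01, if_neg hvm, List.append_nil, pvGo,
            if_neg hv0, if_neg hv1, if_neg hvm]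
          simp [pvPend, hvm]

theorem main_eq (dv : List Int) (hl : Int) :
    aggregate_direction dv hl = aggregate_direction_alt dv hl := by
  obtain ⟨hflat, hlen, hch⟩ := pvRuns_spec dv
  have hg := (pvGroupBy_spec (PySem.List.enumerate dv)).1
  rw [PySem.List.map_snd_enumerate] at hg
  simp only [aggregate_direction, aggregate_direction_alt]
  have hA := amain hl (pvGroupBy (PySem.List.enumerate dv)) (pvGroupBy (PySem.List.enumerate dv)) []
      (PySem.Dict.ofList [("F", 0), ("R", 0), ("H", 0)], []) (by simp)
  have hB := bmain hl (pvRuns dv) hlen hch none none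
      (PySem.Dict.ofList [("F", 0), ("R", 0), ("H", 0)], []) 0
      (by intro v L rs' _; simp)
  rw [hflat] at hB
  simp only [List.length_nil, Int.natCast_zero, List.getLast?_nil, Option.map_none] at hA
  simp only [pvPend, reduceCtorEq, if_false] at hB
  rw [hA, hg, hB]

-- ===== VERDICT (by name: the statement is the Claim_ definition above) =====
theorem aggregate_direction_spec : Claim_equal_aggregate_direction := by
  intro dv hl _ _
  unfold Spec_aggregate_direction
  exact main_eq dv hl
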